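-- pv_equiv track=rewrite | github.com/almatzhezbayev/ubs_solutions | app/routes.py | inverse_encode_index_parity
-- ===== SOURCE A (Python) =====
-- import math
--
-- def inverse_encode_index_parity(x: str) -> str:
--     """Inverse of encode_index_parity"""
--     words = x.split()
--     result = []
--     for word in words:
--         mid = math.ceil(len(word) / 2)
--         evens = word[:mid]
--         odds = word[mid:]
--         reconstructed = []
--         for i in range(len(word)):
--             if i % 2 == 0:
--                 reconstructed.append(evens[i//2] if i//2 < len(evens) else '')
--             else:
--                 reconstructed.append(odds[i//2] if i//2 < len(odds) else '')
--         result.append(''.join(reconstructed))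
--     return ' '.join(result)
-- ===== SOURCE B (Python) =====
-- def inverse_encode_index_parity(x: str) -> str:
--     """Inverse of encode_index_parity"""
--     words = []
--     for w in x.split():
--         mid = (len(w) + 1) // 2
--         evens, odds = w[:mid], w[mid:]
--         chars = []
--         for e, o in zip(evens, odds):
--             chars.append(e)
--             chars.append(o)
--         if len(odds) < len(evens):
--             chars.append(evens[-1])
--         words.append(''.join(chars))
--     return ' '.join(words)
-- ===== Notes on version B (the rewrite author's own statement) =====
-- stated objective: simpler
-- what changed: Replaced the per-word index loop with its parity test, floor divisions and bounds guards by zipping the two halves and emitting each pair, then appending the leftover middle character of an odd-length word.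
import Mathlib
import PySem

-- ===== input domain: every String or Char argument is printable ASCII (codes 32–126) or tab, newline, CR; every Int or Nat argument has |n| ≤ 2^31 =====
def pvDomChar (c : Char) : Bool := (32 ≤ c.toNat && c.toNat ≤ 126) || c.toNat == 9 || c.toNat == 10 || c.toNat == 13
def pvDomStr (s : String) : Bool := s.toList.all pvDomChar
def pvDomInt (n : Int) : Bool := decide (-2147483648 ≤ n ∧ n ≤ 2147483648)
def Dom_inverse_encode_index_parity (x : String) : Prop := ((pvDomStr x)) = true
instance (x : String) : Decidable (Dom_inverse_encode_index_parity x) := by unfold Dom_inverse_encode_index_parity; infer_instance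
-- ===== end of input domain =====

-- B replaces A's per-word index loop (parity test + floor divisions + bounds guards) by zipping
-- the two halves and emitting each pair, then the leftover middle character; simpler decomposition
-- (no speed claim).

-- ===== PORT A =====
-- per-word body of A's loop, on the word's characters
def pvAWord (cs : List Char) : List Char :=
  let n := cs.length
  let mid : Nat := (n + 1) / 2          -- math.ceil(len(word)/2): exact for a nonnegative int length
  let evens := PySem.List.slice cs none (some (mid : Int))
  let odds := PySem.List.slice cs (some (mid : Int)) none
  let reconstructed : List (List Char) :=
    (PySem.List.pyRange 0 (n : Int) 1).foldl (fun acc i =>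
      if PySem.Int.mod i 2 = 0 then
        acc ++ [if PySem.Int.floordiv i 2 < (evens.length : Int) then
                  [PySem.List.pyGetD evens (PySem.Int.floordiv i 2) ' '] else []]
      else
        acc ++ [if PySem.Int.floordiv i 2 < (odds.length : Int) then
                  [PySem.List.pyGetD odds (PySem.Int.floordiv i 2) ' '] else []]) []
  reconstructed.flatten                  -- ''.join(reconstructed): concatenation of the pieces

def inverse_encode_index_parity (x : String) : String :=
  let words := PySem.Str.split₀ x
  let result := words.foldl (fun acc w => acc ++ [String.ofList (pvAWord w.toList)]) []
  PySem.Str.join " " result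

-- ===== PORT B =====
def inverse_encode_index_parity_alt (x : String) : String :=
  PySem.Str.join " " ((PySem.Str.split₀ x).map (fun w =>
    let cs := w.toList
    let mid := (cs.length + 1) / 2
    let evens := cs.take mid
    let odds := cs.drop mid
    let chars := (evens.zip odds).foldl (fun acc p => acc ++ [p.1, p.2]) []
    let chars := if odds.length < evens.length then chars ++ [PySem.List.pyGetD evens (-1) ' '] else chars
    String.ofList chars))

-- ===== PRECONDITION & SPEC =====
def Spec_inverse_encode_index_parity (x : String) (out : String) : Prop := out = inverse_encode_index_parity_alt x
instance (x : String) (out : String) : Decidable (Spec_inverse_encode_index_parity x out) := by unfold Spec_inverse_encode_index_parity; infer_instance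

-- ===== CLAIM (what is proved, stated in full; the proofs are below) =====
def Claim_equal_inverse_encode_index_parity : Prop := ∀ (x : String), Dom_inverse_encode_index_parity x → Spec_inverse_encode_index_parity x (inverse_encode_index_parity x)

-- ===== LEMMAS AND PROOFS =====

lemma pvZip_eq_flatMap (b a : List Char)
    (h1 : b.length ≤ a.length) (h2 : a.length ≤ b.length + 1) :
    (List.range (a.length + b.length)).flatMap
      (fun i => if i % 2 = 0 then (if i / 2 < a.length then [a.getD (i / 2) ' '] else [])
                else (if i / 2 < b.length then [b.getD (i / 2) ' '] else []))
    = (a.zip b).flatMap (fun p => [p.1, p.2])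
        ++ (if b.length < a.length then [PySem.List.pyGetD a (-1) ' '] else []) := by
  induction b generalizing a with
  | nil =>
    match a, h2 with
    | [], _ => simp
    | [x], _ =>
      simp [List.range_succ, PySem.List.pyGetD_neg_one]
  | cons y b' ih =>
    match a, h1 with
    | x :: a', h1 =>
      have h1' : b'.length ≤ a'.length := by simp at h1; omega
      have h2' : a'.length ≤ b'.length + 1 := by simp at h2; omega
      have hlen : (x :: a').length + (y :: b').length = (a'.length + b'.length) + 1 + 1 := by
        simp; omega
      rw [hlen, List.range_succ_eq_map, List.range_succ_eq_map]
      simp only [List.flatMap_cons, List.flatMap_map]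
      have hstep : ∀ i, (fun i => if i % 2 = 0 then
              (if i / 2 < (x :: a').length then [(x :: a').getD (i / 2) ' '] else [])
              else (if i / 2 < (y :: b').length then [(y :: b').getD (i / 2) ' '] else []))
            (i + 1 + 1)
          = (fun i => if i % 2 = 0 then (if i / 2 < a'.length then [a'.getD (i / 2) ' '] else [])
                else (if i / 2 < b'.length then [b'.getD (i / 2) ' '] else [])) i := by
        intro i
        have hm : (i + 1 + 1) % 2 = i % 2 := by omega
        have hd : (i + 1 + 1) / 2 = i / 2 + 1 := by omega
        simp only [hm, hd, List.length_cons, List.getD_cons_succ, Nat.add_lt_add_iff_right]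
      rw [List.flatMap_congr (fun i _ => hstep i)]
      rw [ih a' h1' h2']
      have hif : (if (y :: b').length < (x :: a').length then
            [PySem.List.pyGetD (x :: a') (-1) ' '] else [])
          = (if b'.length < a'.length then [PySem.List.pyGetD a' (-1) ' '] else []) := by
        by_cases hc : b'.length < a'.length
        · have ha' : a' ≠ [] := by
            cases a' with
            | nil => simp at hc
            | cons _ _ => simp
          rw [if_pos (by simpa using hc), if_pos hc]
          simp only [PySem.List.pyGetD_neg_one (x :: a') ' ' (by simp),
            PySem.List.pyGetD_neg_one a' ' ' ha', List.getLast_cons ha']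
        · rw [if_neg (by simpa using hc), if_neg hc]
      rw [List.zip_cons_cons, List.flatMap_cons, hif]
      simp

-- ===== VERDICT (by name: the statement is the Claim_ definition above) =====

theorem inverse_encode_index_parity_spec : Claim_equal_inverse_encode_index_parity := by
  intro x _
  unfold Spec_inverse_encode_index_parity inverse_encode_index_parity inverse_encode_index_parity_alt
  simp only [PySem.List.foldl_append_singleton_eq_map, List.nil_append]
  congr 1
  apply List.map_congr_left
  intro w _
  simp only [PySem.List.foldl_append_eq_flatMap, List.nil_append]
  congr 1
  unfold pvAWord
  simp only [PySem.List.slice_to_natCast, PySem.List.slice_from_natCast]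
  rw [show (fun (acc : List (List Char)) i =>
        if PySem.Int.mod i 2 = 0 then
          acc ++ [if PySem.Int.floordiv i 2 < ((w.toList.take ((w.toList.length + 1) / 2)).length : Int) then
                    [PySem.List.pyGetD (w.toList.take ((w.toList.length + 1) / 2)) (PySem.Int.floordiv i 2) ' '] else []]
        else
          acc ++ [if PySem.Int.floordiv i 2 < ((w.toList.drop ((w.toList.length + 1) / 2)).length : Int) then
                    [PySem.List.pyGetD (w.toList.drop ((w.toList.length + 1) / 2)) (PySem.Int.floordiv i 2) ' '] else []])
      = (fun acc i => acc ++ [if PySem.Int.mod i 2 = 0 then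
          (if PySem.Int.floordiv i 2 < ((w.toList.take ((w.toList.length + 1) / 2)).length : Int) then
                    [PySem.List.pyGetD (w.toList.take ((w.toList.length + 1) / 2)) (PySem.Int.floordiv i 2) ' '] else [])
        else
          (if PySem.Int.floordiv i 2 < ((w.toList.drop ((w.toList.length + 1) / 2)).length : Int) then
                    [PySem.List.pyGetD (w.toList.drop ((w.toList.length + 1) / 2)) (PySem.Int.floordiv i 2) ' '] else [])])
      from by funext acc i; split <;> rfl]
  rw [PySem.List.foldl_append_singleton_eq_map, List.nil_append, ← List.flatMap_def]
  rw [PySem.List.pyRange_zero_natCast]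
  rw [List.flatMap_map]
  set cs := w.toList with hcs
  set m := (cs.length + 1) / 2 with hm
  have hmn : m ≤ cs.length := by omega
  have hlen : cs.length = (cs.take m).length + (cs.drop m).length := by simp; omega
  rw [hlen]
  rw [show (if (cs.drop m).length < (cs.take m).length then
        ((cs.take m).zip (cs.drop m)).flatMap (fun p => [p.1, p.2]) ++ [PySem.List.pyGetD (cs.take m) (-1) ' ']
      else ((cs.take m).zip (cs.drop m)).flatMap (fun p => [p.1, p.2]))
      = ((cs.take m).zip (cs.drop m)).flatMap (fun p => [p.1, p.2])
        ++ (if (cs.drop m).length < (cs.take m).length then [PySem.List.pyGetD (cs.take m) (-1) ' '] else [])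
      from by split <;> simp]
  rw [← pvZip_eq_flatMap (cs.drop m) (cs.take m)
        (by simp; omega) (by simp; omega)]
  apply List.flatMap_congr
  intro i _
  have hmod : PySem.Int.mod (i : Int) 2 = ((i % 2 : Nat) : Int) := by
    exact_mod_cast PySem.Int.mod_natCast i 2
  have hfd : PySem.Int.floordiv (i : Int) 2 = ((i / 2 : Nat) : Int) := by
    exact_mod_cast PySem.Int.floordiv_natCast i 2
  simp only [hmod, hfd, PySem.List.pyGetD_natCast, Nat.cast_lt, Nat.cast_eq_zero]
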